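-- pv_equiv track=rewrite | github.com/vishalsiingh/CodeSprint | Day20/q2.py | solve
-- ===== SOURCE A (Python) =====
-- def solve(arr):
--     n = len(arr)
--     nge = [-1] * n
--     nse = [-1] * n
--     stack = []
--     for i in range(n - 1, -1, -1):
--         while stack and arr[stack[-1]] <= arr[i]:
--             stack.pop()
--         if stack:
--             nge[i] = stack[-1]
--         stack.append(i)
--
--
--     stack.clear()
--     for i in range(n - 1, -1, -1):
--         while stack and arr[stack[-1]] >= arr[i]:
--             stack.pop()
--         if stack:
--             nse[i] = stack[-1]
--         stack.append(i)
--     res = []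
--     for i in range(n):
--         g = nge[i]
--         res.append(arr[nse[g]] if g != -1 and nse[g] != -1 else -1)
--
--     return res
-- ===== SOURCE B (Python) =====
-- def solve(arr):
--     n = len(arr)
--
--     def first_idx(start, pred):
--         for j in range(start, n):
--             if pred(arr[j]):
--                 return j
--         return -1
--
--     out = []
--     for i in range(n):
--         g = first_idx(i + 1, lambda v: v > arr[i])
--         if g == -1:
--             out.append(-1)
--         else:
--             s = first_idx(g + 1, lambda v: v < arr[g])
--             out.append(arr[s] if s != -1 else -1)
--     return out
-- ===== Notes on version B (the rewrite author's own statement) =====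
-- stated objective: simpler
-- what changed: Replaces A's two backward monotonic-stack passes plus precomputed nge/nse arrays with direct per-index forward scans: for each i, scan right for the first strictly greater element, then from it scan right for the first strictly smaller element.
import Mathlib
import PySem

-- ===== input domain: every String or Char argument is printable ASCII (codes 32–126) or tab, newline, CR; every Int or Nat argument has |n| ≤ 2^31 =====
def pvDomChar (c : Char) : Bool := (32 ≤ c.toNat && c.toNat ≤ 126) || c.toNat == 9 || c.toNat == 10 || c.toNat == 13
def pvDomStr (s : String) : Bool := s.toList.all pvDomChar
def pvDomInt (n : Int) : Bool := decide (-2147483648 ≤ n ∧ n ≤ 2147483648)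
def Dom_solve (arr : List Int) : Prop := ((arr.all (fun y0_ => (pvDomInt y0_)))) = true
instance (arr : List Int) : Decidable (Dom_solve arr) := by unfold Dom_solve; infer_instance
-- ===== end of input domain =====

-- B replaces A's two backward monotonic-stack passes by direct per-index forward scans
-- (first greater to the right, then first smaller to the right of that): simpler, no stacks.

-- ===== PORT A =====
-- arr[j]; every index used by either program is in range, so the default is never returned
def valA (arr : List Int) (j : Int) : Int := PySem.List.pyGetD arr j 0

-- one backward stack pass of A (the two loops in A are textually identical up to the
-- pop comparison `c`, which is passed in; head of the list = top of the stack).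
-- `dropWhile` is the `while stack and arr[stack[-1]] C arr[i]: stack.pop()` loop.
def passA (arr : List Int) (c : Int → Int → Bool) : List Int :=
  ((PySem.List.pyRange ((arr.length : Int) - 1) (-1) (-1)).foldl
    (fun st i =>
      let stack := st.2.dropWhile (fun j => c (valA arr j) (valA arr i))
      let res := match stack with
        | [] => st.1
        | t :: _ => PySem.List.pySetD st.1 i t
      (res, i :: stack))
    (List.replicate arr.length (-1), [])).1

def solve (arr : List Int) : List Int :=
  let n : Int := arr.length
  let nge := passA arr (fun x y => x ≤ y)   -- pop while arr[stack[-1]] <= arr[i]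
  let nse := passA arr (fun x y => y ≤ x)   -- pop while arr[stack[-1]] >= arr[i]
  (PySem.List.pyRange 0 n 1).foldl
    (fun res i =>
      let g := PySem.List.pyGetD nge i (-1)
      res ++ [if g ≠ -1 ∧ PySem.List.pyGetD nse g (-1) ≠ -1
              then valA arr (PySem.List.pyGetD nse g (-1)) else -1])
    []

-- ===== PORT B =====
-- first index j in [start, len arr) with pred arr[j], else -1 (Source B's first_idx)
def firstIdx (arr : List Int) (start : Int) (pred : Int → Bool) : Int :=
  ((PySem.List.pyRange start (arr.length : Int) 1).find?
    (fun j => pred (PySem.List.pyGetD arr j 0))).getD (-1)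

def solve_alt (arr : List Int) : List Int :=
  (PySem.List.pyRange 0 (arr.length : Int) 1).map (fun i =>
    let g := firstIdx arr (i + 1) (fun v => PySem.List.pyGetD arr i 0 < v)
    if g = -1 then -1
    else
      let s := firstIdx arr (g + 1) (fun v => v < PySem.List.pyGetD arr g 0)
      if s = -1 then -1 else PySem.List.pyGetD arr s 0)

-- ===== PRECONDITION & SPEC =====
def Spec_solve (arr : List Int) (out : List Int) : Prop := out = solve_alt arr
instance (arr : List Int) (out : List Int) : Decidable (Spec_solve arr out) := by unfold Spec_solve; infer_instance

-- ===== CLAIM (what is proved, stated in full; the proofs are below) =====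
def Claim_equal_solve : Prop := ∀ (arr : List Int), Dom_solve arr → Spec_solve arr (solve arr)

-- ===== LEMMAS AND PROOFS =====

-- spec of one pass: first j in (i, n) whose value is NOT c-related to arr[i], else -1
def fIdx (arr : List Int) (c : Int → Int → Bool) (i : Int) : Int :=
  ((PySem.List.pyRange (i + 1) (arr.length : Int) 1).find?
    (fun j => !(c (valA arr j) (valA arr i)))).getD (-1)

-- the stack at the moment indices ≥ i have been processed (head = top)
def stk (arr : List Int) (c : Int → Int → Bool) (i : Int) : List Int :=
  (PySem.List.pyRange i (arr.length : Int) 1).filter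
    (fun j => (PySem.List.pyRange i j 1).all (fun k => !(c (valA arr j) (valA arr k))))

-- the nge/nse array at the moment indices ≥ i have been processed
def acc (arr : List Int) (c : Int → Int → Bool) (i : Int) : List Int :=
  (List.range arr.length).map (fun (m : Nat) => if i ≤ (m : Int) then fIdx arr c (m : Int) else -1)

-- the step function of A's backward loop (identical to the lambda in passA)
def stepF (arr : List Int) (c : Int → Int → Bool) : (List Int × List Int) → Int → (List Int × List Int) :=
  fun st i =>
      let stack := st.2.dropWhile (fun j => c (valA arr j) (valA arr i))
      let res := match stack with
        | [] => st.1
        | t :: _ => PySem.List.pySetD st.1 i t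
      (res, i :: stack)

lemma pv_dropWhile_eq_filter {l : List Int} {p : Int → Bool}
    (hs : l.Pairwise (· < ·))
    (h : ∀ a ∈ l, ∀ b ∈ l, a < b → p a = false → p b = false) :
    l.dropWhile p = l.filter (fun a => !p a) := by
  induction l with
  | nil => simp
  | cons a t ih =>
    have hs' := List.pairwise_cons.mp hs
    cases hp : p a with
    | true =>
      simp only [List.dropWhile_cons, hp, if_true, List.filter_cons, Bool.not_true,
        Bool.false_eq_true, if_false]
      exact ih hs'.2 (fun x hx y hy hxy => h x (by simp [hx]) y (by simp [hy]) hxy)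
    | false =>
      have hall : ∀ b ∈ t, p b = false := fun b hb =>
        h a (by simp) b (by simp [hb]) (hs'.1 b hb) hp
      simp only [List.dropWhile_cons, hp, Bool.false_eq_true, if_false, List.filter_cons,
        Bool.not_false, if_true]
      rw [List.filter_eq_self.mpr (fun b hb => by simp [hall b hb])]

lemma pv_find?_min {l : List Int} {p : Int → Bool} {j0 : Int}
    (h : l.find? p = some j0) (hs : l.Pairwise (· < ·)) :
    ∀ a ∈ l, a < j0 → p a = false := by
  induction l with
  | nil => simp at h
  | cons a t ih =>
    have hs' := List.pairwise_cons.mp hs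
    intro b hb hbj
    cases hp : p a with
    | true =>
      rw [List.find?_cons_of_pos hp] at h
      injection h with h; subst h
      rcases List.mem_cons.mp hb with rfl | hbt
      · omega
      · exact absurd (hs'.1 b hbt) (by omega)
    | false =>
      rw [List.find?_cons_of_neg (by simp [hp])] at h
      rcases List.mem_cons.mp hb with rfl | hbt
      · exact hp
      · exact ih h hs'.2 b hbt hbj

lemma pv_find?_some_filter {l : List Int} {p q : Int → Bool} {j0 : Int}
    (h : l.find? p = some j0) (hq : q j0 = true) :
    (l.filter (fun a => p a && q a)).head? = some j0 := by
  induction l with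
  | nil => simp at h
  | cons a t ih =>
    cases hp : p a with
    | true =>
      rw [List.find?_cons_of_pos hp] at h
      injection h with h; subst h
      simp [hp, hq]
    | false =>
      rw [List.find?_cons_of_neg (by simp [hp])] at h
      simp only [List.filter_cons, hp, Bool.false_and, Bool.false_eq_true, if_false]
      exact ih h

lemma pv_stk_mem {arr : List Int} {c : Int → Int → Bool} {i j : Int} (hj : j ∈ stk arr c i) :
    i ≤ j ∧ j < (arr.length : Int) ∧
      ∀ k, i ≤ k → k < j → c (valA arr j) (valA arr k) = false := by
  unfold stk at hj
  rcases List.mem_filter.mp hj with ⟨hmem, hall⟩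
  rcases (PySem.List.mem_pyRange_one).mp hmem with ⟨h1, h2⟩
  refine ⟨h1, h2, fun k hk1 hk2 => ?_⟩
  have := List.all_eq_true.mp hall k ((PySem.List.mem_pyRange_one).mpr ⟨hk1, hk2⟩)
  simpa using this

lemma pv_stk_sorted (arr : List Int) (c : Int → Int → Bool) (i : Int) :
    (stk arr c i).Pairwise (· < ·) := by
  unfold stk
  exact (PySem.List.pairwise_lt_pyRange_one i _).filter _

lemma pv_acc_get (arr : List Int) (c : Int → Int → Bool) (i : Int) (m : Nat)
    (hm : m < arr.length) :
    (acc arr c i)[m]'(by simp [acc, hm]) = if i ≤ (m : Int) then fIdx arr c m else -1 := by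
  unfold acc
  rw [List.getElem_map, List.getElem_range]

lemma pv_step (arr : List Int) (c : Int → Int → Bool)
    (htrans : ∀ x y z : Int, c y x = false → c z y = false → c z x = false)
    (hc2 : ∀ x y z : Int, c z x = false → c y x = true → c z y = false)
    (i : Int) (h0 : 0 ≤ i) (hi : i < (arr.length : Int)) :
    stepF arr c (acc arr c (i + 1), stk arr c (i + 1)) i = (acc arr c i, stk arr c i) := by
  have hdw : (stk arr c (i + 1)).dropWhile (fun j => c (valA arr j) (valA arr i))
      = (stk arr c (i + 1)).filter (fun j => !(c (valA arr j) (valA arr i))) := by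
    refine pv_dropWhile_eq_filter (pv_stk_sorted arr c (i + 1)) ?_
    intro a ha b hb hab hpa
    rcases pv_stk_mem hb with ⟨hb1, _, hb3⟩
    rcases pv_stk_mem ha with ⟨ha1, _, _⟩
    exact htrans (valA arr i) (valA arr a) (valA arr b) hpa (hb3 a ha1 hab)
  have hff : (stk arr c (i + 1)).filter (fun j => !(c (valA arr j) (valA arr i)))
      = (PySem.List.pyRange (i + 1) (arr.length : Int) 1).filter
          (fun j => (!(c (valA arr j) (valA arr i))) &&
            (PySem.List.pyRange (i + 1) j 1).all (fun k => !(c (valA arr j) (valA arr k)))) := by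
    unfold stk
    rw [List.filter_filter]
  have hstk : i :: (stk arr c (i + 1)).filter (fun j => !(c (valA arr j) (valA arr i)))
      = stk arr c i := by
    rw [hff]
    unfold stk
    rw [PySem.List.pyRange_one_cons hi, List.filter_cons]
    rw [if_pos (by rw [PySem.List.pyRange_one_eq_nil le_rfl]; simp)]
    congr 1
    refine List.filter_congr ?_
    intro j hj
    rcases (PySem.List.mem_pyRange_one).mp hj with ⟨hj1, _⟩
    rw [show PySem.List.pyRange i j 1 = i :: PySem.List.pyRange (i + 1) j 1 from
      PySem.List.pyRange_one_cons (by omega), List.all_cons]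
  have hhead : ((stk arr c (i + 1)).filter (fun j => !(c (valA arr j) (valA arr i)))).head?
      = (PySem.List.pyRange (i + 1) (arr.length : Int) 1).find?
          (fun j => !(c (valA arr j) (valA arr i))) := by
    cases hf : (PySem.List.pyRange (i + 1) (arr.length : Int) 1).find?
        (fun j => !(c (valA arr j) (valA arr i))) with
    | none =>
      have hnone := List.find?_eq_none.mp hf
      rw [hff, List.filter_eq_nil_iff.mpr
        (fun a ha hcon => hnone a ha ((Bool.and_eq_true _ _).mp hcon).1)]
      rfl
    | some j0 =>
      have hj0p := List.find?_some hf
      have hj0m := List.mem_of_find?_eq_some hf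
      rcases (PySem.List.mem_pyRange_one).mp hj0m with ⟨hj01, hj02⟩
      have hmin := pv_find?_min hf (PySem.List.pairwise_lt_pyRange_one _ _)
      have hq : (PySem.List.pyRange (i + 1) j0 1).all
          (fun k => !(c (valA arr j0) (valA arr k))) = true := by
        rw [List.all_eq_true]
        intro k hk
        rcases (PySem.List.mem_pyRange_one).mp hk with ⟨hk1, hk2⟩
        have hkq : (!(c (valA arr k) (valA arr i))) = false :=
          hmin k ((PySem.List.mem_pyRange_one).mpr ⟨hk1, by omega⟩) hk2
        have : c (valA arr k) (valA arr i) = true := by simpa using hkq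
        simp [hc2 (valA arr i) (valA arr k) (valA arr j0) (by simpa using hj0p) this]
      rw [hff]
      exact pv_find?_some_filter hf hq
  -- now compute both components
  unfold stepF
  simp only [hdw]
  refine Prod.ext ?_ ?_
  · -- the nge/nse array component
    show (match (stk arr c (i + 1)).filter (fun j => !(c (valA arr j) (valA arr i))) with
      | [] => acc arr c (i + 1)
      | t :: _ => PySem.List.pySetD (acc arr c (i + 1)) i t) = acc arr c i
    cases hl : (stk arr c (i + 1)).filter (fun j => !(c (valA arr j) (valA arr i))) with
    | nil =>
      have hfnone : (PySem.List.pyRange (i + 1) (arr.length : Int) 1).find?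
          (fun j => !(c (valA arr j) (valA arr i))) = none := by
        rw [← hhead, hl]; rfl
      have hfi : fIdx arr c i = -1 := by unfold fIdx; rw [hfnone]; rfl
      show acc arr c (i + 1) = acc arr c i
      unfold acc
      refine List.map_congr_left ?_
      intro m hm
      by_cases h : i ≤ (m : Int)
      · by_cases h' : i + 1 ≤ (m : Int)
        · simp [h, h']
        · have : (m : Int) = i := by omega
          simp [this, hfi]
      · simp [h, show ¬ (i + 1 ≤ (m : Int)) by omega]
    | cons t rest =>
      have hfsome : (PySem.List.pyRange (i + 1) (arr.length : Int) 1).find?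
          (fun j => !(c (valA arr j) (valA arr i))) = some t := by
        rw [← hhead, hl]; rfl
      have hfi : fIdx arr c i = t := by unfold fIdx; rw [hfsome]; rfl
      show PySem.List.pySetD (acc arr c (i + 1)) i t = acc arr c i
      rw [PySem.List.pySetD_of_nonneg _ _ h0]
      refine List.ext_getElem (by simp [acc]) ?_
      intro m hm1 hm2
      have hmlen : m < arr.length := by simpa [acc] using hm2
      rw [List.getElem_set, pv_acc_get arr c i m hmlen]
      by_cases he : i.toNat = m
      · rw [if_pos he, if_pos (by omega), ← hfi]
        congr 1
        omega
      · rw [if_neg he, pv_acc_get arr c (i + 1) m hmlen]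
        by_cases h' : i + 1 ≤ (m : Int)
        · rw [if_pos h', if_pos (by omega)]
        · rw [if_neg h', if_neg (by omega)]
  · -- the stack component
    exact hstk

lemma pv_init (arr : List Int) (c : Int → Int → Bool) :
    (List.replicate arr.length (-1 : Int), ([] : List Int))
      = (acc arr c arr.length, stk arr c arr.length) := by
  refine Prod.ext ?_ ?_
  · refine List.ext_getElem (by simp [acc]) ?_
    intro m hm1 hm2
    have hmlen : m < arr.length := by simpa using hm1
    rw [List.getElem_replicate, pv_acc_get arr c arr.length m hmlen,
      if_neg (by exact_mod_cast by omega)]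
  · show ([] : List Int) = stk arr c arr.length
    unfold stk
    rw [PySem.List.pyRange_one_eq_nil le_rfl]
    rfl

lemma pv_fold (arr : List Int) (c : Int → Int → Bool)
    (htrans : ∀ x y z : Int, c y x = false → c z y = false → c z x = false)
    (hc2 : ∀ x y z : Int, c z x = false → c y x = true → c z y = false) :
    ∀ m : Nat, m ≤ arr.length →
      (PySem.List.pyRange ((m : Int) - 1) (-1) (-1)).foldl (stepF arr c)
          (acc arr c m, stk arr c m)
        = (acc arr c 0, stk arr c 0) := by
  intro m
  induction m with
  | zero =>
    intro _
    rw [PySem.List.pyRange_neg_one_eq_nil (by norm_num)]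
    norm_num
  | succ m ih =>
    intro hm
    rw [show (((m + 1 : Nat) : Int) - 1) = (m : Int) by push_cast; ring]
    rw [show PySem.List.pyRange (m : Int) (-1) (-1)
        = (m : Int) :: PySem.List.pyRange ((m : Int) - 1) (-1) (-1) from
      PySem.List.pyRange_neg_one_cons (by omega), List.foldl_cons]
    have hstep := pv_step arr c htrans hc2 (m : Int) (by omega) (by omega)
    rw [show ((m + 1 : Nat) : Int) = (m : Int) + 1 by push_cast; ring, hstep]
    exact ih (by omega)

lemma pv_passA (arr : List Int) (c : Int → Int → Bool)
    (htrans : ∀ x y z : Int, c y x = false → c z y = false → c z x = false)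
    (hc2 : ∀ x y z : Int, c z x = false → c y x = true → c z y = false) :
    passA arr c = acc arr c 0 := by
  unfold passA
  rw [pv_init arr c]
  have : ((PySem.List.pyRange ((arr.length : Int) - 1) (-1) (-1)).foldl (stepF arr c)
      (acc arr c arr.length, stk arr c arr.length)) = (acc arr c 0, stk arr c 0) :=
    pv_fold arr c htrans hc2 arr.length le_rfl
  exact congrArg Prod.fst this

lemma pv_acc_zero_get (arr : List Int) (c : Int → Int → Bool) (i : Int)
    (h0 : 0 ≤ i) (hi : i < (arr.length : Int)) :
    PySem.List.pyGetD (acc arr c 0) i (-1) = fIdx arr c i := by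
  rw [PySem.List.pyGetD_of_nonneg _ _ h0]
  have hlen : i.toNat < arr.length := by omega
  rw [List.getD_eq_getElem _ _ (by simpa [acc] using hlen),
    pv_acc_get arr c 0 i.toNat hlen, if_pos (by omega)]
  congr 1
  omega

lemma pv_fIdx_cases (arr : List Int) (c : Int → Int → Bool) (i : Int) :
    fIdx arr c i = -1 ∨ (i + 1 ≤ fIdx arr c i ∧ fIdx arr c i < (arr.length : Int)) := by
  unfold fIdx
  cases hf : (PySem.List.pyRange (i + 1) (arr.length : Int) 1).find?
      (fun j => !(c (valA arr j) (valA arr i))) with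
  | none => left; rfl
  | some j0 =>
    right
    have := (PySem.List.mem_pyRange_one).mp (List.mem_of_find?_eq_some hf)
    simpa using this

-- the two pop-comparisons of A satisfy the chain conditions
lemma pv_le_trans : ∀ x y z : Int, (decide (y ≤ x)) = false → (decide (z ≤ y)) = false →
    (decide (z ≤ x)) = false := by
  intro x y z h1 h2
  simp only [decide_eq_false_iff_not, not_le] at *
  omega

lemma pv_le_c2 : ∀ x y z : Int, (decide (x ≤ z)) = false → (decide (x ≤ y)) = true →
    (decide (y ≤ z)) = false := by
  intro x y z h1 h2
  simp only [decide_eq_false_iff_not, decide_eq_true_eq, not_le] at *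
  omega

lemma pv_ge_trans : ∀ x y z : Int, (decide (x ≤ y)) = false → (decide (y ≤ z)) = false →
    (decide (x ≤ z)) = false := by
  intro x y z h1 h2
  simp only [decide_eq_false_iff_not, not_le] at *
  omega

lemma pv_ge_c2 : ∀ x y z : Int, (decide (z ≤ x)) = false → (decide (y ≤ x)) = true →
    (decide (z ≤ y)) = false := by
  intro x y z h1 h2
  simp only [decide_eq_false_iff_not, decide_eq_true_eq, not_le] at *
  omega

-- B's first_idx scans are exactly the fIdx specification
lemma pv_firstIdx_gt (arr : List Int) (i : Int) :
    firstIdx arr (i + 1) (fun v => PySem.List.pyGetD arr i 0 < v)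
      = fIdx arr (fun x y => x ≤ y) i := by
  unfold firstIdx fIdx
  have : (fun j => decide (PySem.List.pyGetD arr i 0 < PySem.List.pyGetD arr j 0))
      = (fun j => !(decide (valA arr j ≤ valA arr i))) := by
    funext j
    by_cases h : PySem.List.pyGetD arr i 0 < PySem.List.pyGetD arr j 0
    · simp [valA, h]
    · simp [valA, h]
      omega
  rw [this]

lemma pv_firstIdx_lt (arr : List Int) (g : Int) :
    firstIdx arr (g + 1) (fun v => v < PySem.List.pyGetD arr g 0)
      = fIdx arr (fun x y => y ≤ x) g := by
  unfold firstIdx fIdx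
  have : (fun j => decide (PySem.List.pyGetD arr j 0 < PySem.List.pyGetD arr g 0))
      = (fun j => !(decide (valA arr g ≤ valA arr j))) := by
    funext j
    by_cases h : PySem.List.pyGetD arr j 0 < PySem.List.pyGetD arr g 0
    · simp [valA, h]
    · simp [valA, h]
      omega
  rw [this]

-- ===== VERDICT (by name: the statement is the Claim_ definition above) =====
theorem solve_spec : Claim_equal_solve := by
  unfold Claim_equal_solve Spec_solve
  intro arr _
  have hle : passA arr (fun x y => x ≤ y) = acc arr (fun x y => x ≤ y) 0 :=
    pv_passA arr _ pv_le_trans pv_ge_c2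
  have hge : passA arr (fun x y => y ≤ x) = acc arr (fun x y => y ≤ x) 0 :=
    pv_passA arr _ pv_ge_trans pv_le_c2
  show solve arr = solve_alt arr
  unfold solve solve_alt
  simp only [hle, hge, PySem.List.foldl_append_singleton_eq_map]
  refine List.map_congr_left ?_
  intro i hi
  rcases (PySem.List.mem_pyRange_one).mp hi with ⟨hi0, hin⟩
  rw [pv_acc_zero_get arr _ i hi0 hin, pv_firstIdx_gt arr i]
  rcases pv_fIdx_cases arr (fun x y => x ≤ y) i with hg | ⟨hg1, hg2⟩
  · rw [hg, if_pos rfl, if_neg (by simp)]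
  · have hgne : fIdx arr (fun x y => x ≤ y) i ≠ -1 := by omega
    rw [if_neg hgne,
      pv_acc_zero_get arr _ (fIdx arr (fun x y => x ≤ y) i) (by omega) hg2,
      pv_firstIdx_lt arr _]
    rcases pv_fIdx_cases arr (fun x y => y ≤ x) (fIdx arr (fun x y => x ≤ y) i) with hs | ⟨hs1, _⟩
    · rw [hs, if_pos rfl, if_neg (by simp)]
    · have hsne : fIdx arr (fun x y => y ≤ x) (fIdx arr (fun x y => x ≤ y) i) ≠ -1 := by omega
      rw [if_neg hsne, if_pos ⟨hgne, hsne⟩]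
      rfl
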